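-- pv_equiv track=rewrite | github.com/yuqing5/Carbon-Tracker-California | utils.py | match_caiso
-- ===== SOURCE A (Python) =====
-- import collections
--
-- def match_caiso(gen_by_fuel):
--     '''
--     Match the fuel type in our data to CAISO fuel type.
--     '''
--     fuel_type_to_caiso = collections.defaultdict(str)
--     for k, v in gen_by_fuel.items():
--         if 'Natural Gas' in k:
--             fuel_type_to_caiso[k] = 0 #'Natural Gas'
--         elif 'Other Gases' in k or 'Landfill' in k:
--             fuel_type_to_caiso[k] = 11 #'Biogas'
--         elif 'Coal' in k:
--             fuel_type_to_caiso[k] = 5 #'Coal'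
--         elif 'Biomass' in k or 'Waste' in k:
--             fuel_type_to_caiso[k] = 10 #'Biomass'
--         elif 'Geothermal' in k:
--             fuel_type_to_caiso[k] = 9 #'Geothermal'
--         elif 'Batteries' in k:
--             fuel_type_to_caiso[k] = 3
--         elif 'uclear' in k:
--             fuel_type_to_caiso[k] = 4
--         elif 'Solar' in k:
--             fuel_type_to_caiso[k] = 7
--         elif 'Wind' in k:
--             fuel_type_to_caiso[k] = 8
--         elif 'Hydro' in k:
--             fuel_type_to_caiso[k] = 1
--         elif 'IMPORT' in k:
--             fuel_type_to_caiso[k] = 2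
--         else: #others
--             fuel_type_to_caiso[k] = 6
--     return fuel_type_to_caiso
-- ===== SOURCE B (Python) =====
-- import collections
--
-- _CAISO_TABLE = [
--     ('Natural Gas', 0), ('Other Gases', 11), ('Landfill', 11), ('Coal', 5),
--     ('Biomass', 10), ('Waste', 10), ('Geothermal', 9), ('Batteries', 3),
--     ('uclear', 4), ('Solar', 7), ('Wind', 8), ('Hydro', 1), ('IMPORT', 2),
-- ]
--
-- def match_caiso(gen_by_fuel):
--     # Pattern-major classification: each pattern, in priority order, claims
--     # every still-unmatched key in one pass over a shrinking worklist.
--     codes = {}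
--     remaining = list(gen_by_fuel)
--     for pat, code in _CAISO_TABLE:
--         for k in [k for k in remaining if pat in k]:
--             codes[k] = code
--         remaining = [k for k in remaining if pat not in k]
--     out = collections.defaultdict(str)
--     for k in gen_by_fuel:
--         out[k] = codes.get(k, 6)
--     return out
-- ===== Notes on version B (the rewrite author's own statement) =====
-- stated objective: alternative
-- what changed: Inverts the loop nesting: instead of testing all 13 substrings per key, B loops pattern-major, each pattern claiming every still-unmatched key from a shrinking worklist, then emits the dict in input order with default 6.
import Mathlib
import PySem

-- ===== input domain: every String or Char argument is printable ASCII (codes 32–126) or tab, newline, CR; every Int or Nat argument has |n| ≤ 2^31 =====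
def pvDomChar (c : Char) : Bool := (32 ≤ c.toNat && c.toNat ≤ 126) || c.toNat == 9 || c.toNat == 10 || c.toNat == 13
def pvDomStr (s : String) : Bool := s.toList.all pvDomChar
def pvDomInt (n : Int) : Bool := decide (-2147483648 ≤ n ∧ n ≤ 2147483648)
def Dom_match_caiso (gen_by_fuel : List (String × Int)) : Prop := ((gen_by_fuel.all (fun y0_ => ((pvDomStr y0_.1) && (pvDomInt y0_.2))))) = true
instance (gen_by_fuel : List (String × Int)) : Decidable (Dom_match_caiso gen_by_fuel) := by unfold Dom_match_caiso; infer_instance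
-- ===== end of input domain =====

-- B inverts the loop nesting: a pattern-major classification over a shrinking worklist instead of A's per-key 13-branch chain (alternative; same cost).

-- ===== PORT A =====
-- A iterates the dict's items and assigns via an if-elif chain of substring tests.
def match_caiso (gen_by_fuel : List (String × Int)) : List (String × Int) :=
  (gen_by_fuel.foldl (fun d kv =>
    let k := kv.1
    if PySem.Str.isIn "Natural Gas" k then d.insert k 0
    else if PySem.Str.isIn "Other Gases" k || PySem.Str.isIn "Landfill" k then d.insert k 11
    else if PySem.Str.isIn "Coal" k then d.insert k 5
    else if PySem.Str.isIn "Biomass" k || PySem.Str.isIn "Waste" k then d.insert k 10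
    else if PySem.Str.isIn "Geothermal" k then d.insert k 9
    else if PySem.Str.isIn "Batteries" k then d.insert k 3
    else if PySem.Str.isIn "uclear" k then d.insert k 4
    else if PySem.Str.isIn "Solar" k then d.insert k 7
    else if PySem.Str.isIn "Wind" k then d.insert k 8
    else if PySem.Str.isIn "Hydro" k then d.insert k 1
    else if PySem.Str.isIn "IMPORT" k then d.insert k 2
    else d.insert k 6) (PySem.Dict.empty : PySem.Dict String Int)).items

-- ===== PORT B =====
def caisoTable : List (String × Int) :=
  [("Natural Gas", 0), ("Other Gases", 11), ("Landfill", 11), ("Coal", 5),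
   ("Biomass", 10), ("Waste", 10), ("Geothermal", 9), ("Batteries", 3),
   ("uclear", 4), ("Solar", 7), ("Wind", 8), ("Hydro", 1), ("IMPORT", 2)]

-- the pattern-major loop: each pattern claims the still-unmatched keys of the worklist
def caisoClassify : List (String × Int) → List String → PySem.Dict String Int → PySem.Dict String Int
  | [], _, codes => codes
  | (pat, code) :: rest, remaining, codes =>
      caisoClassify rest (remaining.filter (fun k => !(PySem.Str.isIn pat k)))
        ((remaining.filter (fun k => PySem.Str.isIn pat k)).foldl
          (fun d k => d.insert k code) codes)

def match_caiso_alt (gen_by_fuel : List (String × Int)) : List (String × Int) :=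
  let codes := caisoClassify caisoTable (gen_by_fuel.map Prod.fst) PySem.Dict.empty
  (gen_by_fuel.foldl (fun d kv => d.insert kv.1 (codes.getD kv.1 6))
    (PySem.Dict.empty : PySem.Dict String Int)).items

-- ===== PRECONDITION & SPEC =====
def Spec_match_caiso (gen_by_fuel : List (String × Int)) (out : List (String × Int)) : Prop := out = match_caiso_alt gen_by_fuel
instance (gen_by_fuel : List (String × Int)) (out : List (String × Int)) : Decidable (Spec_match_caiso gen_by_fuel out) := by unfold Spec_match_caiso; infer_instance

-- ===== CLAIM (what is proved, stated in full; the proofs are below) =====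
def Claim_equal_match_caiso : Prop := ∀ (gen_by_fuel : List (String × Int)), Dom_match_caiso gen_by_fuel → Spec_match_caiso gen_by_fuel (match_caiso gen_by_fuel)

-- ===== LEMMAS AND PROOFS =====

-- the value A's chain assigns to key k
def chainCode (k : String) : Int :=
  if PySem.Str.isIn "Natural Gas" k then 0
  else if PySem.Str.isIn "Other Gases" k || PySem.Str.isIn "Landfill" k then 11
  else if PySem.Str.isIn "Coal" k then 5
  else if PySem.Str.isIn "Biomass" k || PySem.Str.isIn "Waste" k then 10
  else if PySem.Str.isIn "Geothermal" k then 9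
  else if PySem.Str.isIn "Batteries" k then 3
  else if PySem.Str.isIn "uclear" k then 4
  else if PySem.Str.isIn "Solar" k then 7
  else if PySem.Str.isIn "Wind" k then 8
  else if PySem.Str.isIn "Hydro" k then 1
  else if PySem.Str.isIn "IMPORT" k then 2
  else 6

theorem getD_foldl_insert (l : List String) (d : PySem.Dict String Int)
    (k : String) (c v : Int) :
    ((l.foldl (fun d k => d.insert k c) d).getD k v) =
      if k ∈ l then c else d.getD k v := by
  induction l generalizing d with
  | nil => simp [List.foldl]
  | cons x xs ih =>
      simp only [List.foldl, ih, PySem.Dict.getD_insert, List.mem_cons]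
      by_cases hx : k = x <;> by_cases hxs : k ∈ xs <;> simp [hx, hxs]

theorem caisoClassify_getD (tbl : List (String × Int)) (remaining : List String)
    (codes : PySem.Dict String Int) (k : String) (v : Int) :
    (caisoClassify tbl remaining codes).getD k v =
      if k ∈ remaining then
        ((tbl.find? (fun pc => PySem.Str.isIn pc.1 k)).map Prod.snd).getD (codes.getD k v)
      else codes.getD k v := by
  induction tbl generalizing remaining codes with
  | nil => simp [caisoClassify, List.find?]
  | cons pc rest ih =>
      obtain ⟨pat, code⟩ := pc
      rw [caisoClassify, ih, getD_foldl_insert]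
      by_cases hr : k ∈ remaining
      · cases hp : PySem.Str.isIn pat k with
        | true =>
            have hp' : PySem.Chars.isIn pat.toList k.toList = true := hp
            have hn : k ∉ remaining.filter (fun k => !(PySem.Str.isIn pat k)) := by
              simp [List.mem_filter, PySem.Str.isIn, hp']
            have hm : k ∈ remaining.filter (fun k => PySem.Str.isIn pat k) := by
              simp [List.mem_filter, PySem.Str.isIn, hr, hp']
            rw [if_neg hn, if_pos hm, if_pos hr,
              List.find?_cons_of_pos (a := (pat, code)) (l := rest)
                (p := fun pc => PySem.Str.isIn pc.1 k) (by simpa using hp)]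
            rfl
        | false =>
            have hp' : PySem.Chars.isIn pat.toList k.toList = false := hp
            have hn : k ∈ remaining.filter (fun k => !(PySem.Str.isIn pat k)) := by
              simp [List.mem_filter, PySem.Str.isIn, hr, hp']
            have hm : k ∉ remaining.filter (fun k => PySem.Str.isIn pat k) := by
              simp [List.mem_filter, PySem.Str.isIn, hp']
            rw [if_pos hn, if_neg hm, if_pos hr,
              List.find?_cons_of_neg (a := (pat, code)) (l := rest)
                (p := fun pc => PySem.Str.isIn pc.1 k) (by simpa using hp)]
      · have hn : k ∉ remaining.filter (fun k => !(PySem.Str.isIn pat k)) :=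
          fun h => hr (List.mem_filter.mp h).1
        have hm : k ∉ remaining.filter (fun k => PySem.Str.isIn pat k) :=
          fun h => hr (List.mem_filter.mp h).1
        rw [if_neg hn, if_neg hm, if_neg hr]

theorem match_caiso_step (d : PySem.Dict String Int) (kv : String × Int) :
    (let k := kv.1
    if PySem.Str.isIn "Natural Gas" k then d.insert k 0
    else if PySem.Str.isIn "Other Gases" k || PySem.Str.isIn "Landfill" k then d.insert k 11
    else if PySem.Str.isIn "Coal" k then d.insert k 5
    else if PySem.Str.isIn "Biomass" k || PySem.Str.isIn "Waste" k then d.insert k 10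
    else if PySem.Str.isIn "Geothermal" k then d.insert k 9
    else if PySem.Str.isIn "Batteries" k then d.insert k 3
    else if PySem.Str.isIn "uclear" k then d.insert k 4
    else if PySem.Str.isIn "Solar" k then d.insert k 7
    else if PySem.Str.isIn "Wind" k then d.insert k 8
    else if PySem.Str.isIn "Hydro" k then d.insert k 1
    else if PySem.Str.isIn "IMPORT" k then d.insert k 2
    else d.insert k 6) = d.insert kv.1 (chainCode kv.1) := by
  dsimp only [chainCode]
  generalize PySem.Str.isIn "Natural Gas" kv.1 = c1
  generalize PySem.Str.isIn "Other Gases" kv.1 = c2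
  generalize PySem.Str.isIn "Landfill" kv.1 = c3
  generalize PySem.Str.isIn "Coal" kv.1 = c4
  generalize PySem.Str.isIn "Biomass" kv.1 = c5
  generalize PySem.Str.isIn "Waste" kv.1 = c6
  generalize PySem.Str.isIn "Geothermal" kv.1 = c7
  generalize PySem.Str.isIn "Batteries" kv.1 = c8
  generalize PySem.Str.isIn "uclear" kv.1 = c9
  generalize PySem.Str.isIn "Solar" kv.1 = c10
  generalize PySem.Str.isIn "Wind" kv.1 = c11
  generalize PySem.Str.isIn "Hydro" kv.1 = c12
  generalize PySem.Str.isIn "IMPORT" kv.1 = c13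
  cases c1 with
  | true => rfl
  | false =>
    cases c2 with
    | true => rfl
    | false =>
      cases c3 with
      | true => rfl
      | false =>
        cases c4 with
        | true => rfl
        | false =>
          cases c5 with
          | true => rfl
          | false =>
            cases c6 with
            | true => rfl
            | false =>
              cases c7 with
              | true => rfl
              | false =>
                cases c8 with
                | true => rfl
                | false =>
                  cases c9 with
                  | true => rfl
                  | false =>
                    cases c10 with
                    | true => rfl
                    | false =>
                      cases c11 with
                      | true => rfl
                      | false =>
                        cases c12 with
                        | true => rfl
                        | false =>
                          cases c13 with
                          | true => rfl
                          | false =>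
                            rfl

-- the first matching table entry carries exactly the chain's value
theorem find_caisoTable_eq_chain (k : String) :
    ((caisoTable.find? (fun pc => PySem.Str.isIn pc.1 k)).map Prod.snd).getD 6 =
      chainCode k := by
  unfold caisoTable chainCode
  cases h1 : PySem.Chars.isIn ['N', 'a', 't', 'u', 'r', 'a', 'l', ' ', 'G', 'a', 's'] k.toList with
  | true => simp [List.find?, PySem.Str.isIn, h1]
  | false =>
    cases h2 : PySem.Chars.isIn ['O', 't', 'h', 'e', 'r', ' ', 'G', 'a', 's', 'e', 's'] k.toList with
    | true => simp [List.find?, PySem.Str.isIn, h1, h2]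
    | false =>
      cases h3 : PySem.Chars.isIn ['L', 'a', 'n', 'd', 'f', 'i', 'l', 'l'] k.toList with
      | true => simp [List.find?, PySem.Str.isIn, h1, h2, h3]
      | false =>
        cases h4 : PySem.Chars.isIn ['C', 'o', 'a', 'l'] k.toList with
        | true => simp [List.find?, PySem.Str.isIn, h1, h2, h3, h4]
        | false =>
          cases h5 : PySem.Chars.isIn ['B', 'i', 'o', 'm', 'a', 's', 's'] k.toList with
          | true => simp [List.find?, PySem.Str.isIn, h1, h2, h3, h4, h5]
          | false =>
            cases h6 : PySem.Chars.isIn ['W', 'a', 's', 't', 'e'] k.toList with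
            | true => simp [List.find?, PySem.Str.isIn, h1, h2, h3, h4, h5, h6]
            | false =>
              cases h7 : PySem.Chars.isIn ['G', 'e', 'o', 't', 'h', 'e', 'r', 'm', 'a', 'l'] k.toList with
              | true => simp [List.find?, PySem.Str.isIn, h1, h2, h3, h4, h5, h6, h7]
              | false =>
                cases h8 : PySem.Chars.isIn ['B', 'a', 't', 't', 'e', 'r', 'i', 'e', 's'] k.toList with
                | true => simp [List.find?, PySem.Str.isIn, h1, h2, h3, h4, h5, h6, h7, h8]
                | false =>
                  cases h9 : PySem.Chars.isIn ['u', 'c', 'l', 'e', 'a', 'r'] k.toList with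
                  | true => simp [List.find?, PySem.Str.isIn, h1, h2, h3, h4, h5, h6, h7, h8, h9]
                  | false =>
                    cases h10 : PySem.Chars.isIn ['S', 'o', 'l', 'a', 'r'] k.toList with
                    | true => simp [List.find?, PySem.Str.isIn, h1, h2, h3, h4, h5, h6, h7, h8, h9, h10]
                    | false =>
                      cases h11 : PySem.Chars.isIn ['W', 'i', 'n', 'd'] k.toList with
                      | true => simp [List.find?, PySem.Str.isIn, h1, h2, h3, h4, h5, h6, h7, h8, h9, h10, h11]
                      | false =>
                        cases h12 : PySem.Chars.isIn ['H', 'y', 'd', 'r', 'o'] k.toList with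
                        | true => simp [List.find?, PySem.Str.isIn, h1, h2, h3, h4, h5, h6, h7, h8, h9, h10, h11, h12]
                        | false =>
                          cases h13 : PySem.Chars.isIn ['I', 'M', 'P', 'O', 'R', 'T'] k.toList with
                          | true => simp [List.find?, PySem.Str.isIn, h1, h2, h3, h4, h5, h6, h7, h8, h9, h10, h11, h12, h13]
                          | false =>
                            simp [List.find?, PySem.Str.isIn, h1, h2, h3, h4, h5, h6, h7, h8, h9, h10, h11, h12, h13]

-- ===== VERDICT (by name: the statement is the Claim_ definition above) =====
theorem match_caiso_spec : Claim_equal_match_caiso := by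
  intro g _
  show match_caiso g = match_caiso_alt g
  unfold match_caiso match_caiso_alt
  dsimp only
  congr 1
  apply PySem.List.foldl_congr_mem
  intro acc kv hkv
  rw [match_caiso_step]
  have hk : kv.1 ∈ g.map Prod.fst := List.mem_map_of_mem hkv
  rw [caisoClassify_getD, if_pos hk]
  have : (PySem.Dict.empty : PySem.Dict String Int).getD kv.1 6 = 6 := rfl
  rw [this, find_caisoTable_eq_chain]
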